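-- pv_equiv track=rewrite | github.com/AmrYami/co-pilot | apps/dw/contracts/named_filters.py | _find_category_for_value
-- ===== SOURCE A (Python) =====
-- from typing import Dict, List, Tuple, Optional
--
-- def _find_category_for_value(spec: dict, raw_value: str) -> Optional[str]:
--     """
--     Given the per-column spec (e.g. {'renewal': {'equals': [...], 'prefix': [...], 'contains': [...]}, ...}),
--     try to find which category matches the raw value (case-insensitive).
--     """
--     rv = raw_value.strip()
--     rv_up = rv.upper()
--
--     for cat, d in spec.items():
--         equals = [str(x) for x in d.get("equals", [])]
--         if any(rv_up == str(e).upper() for e in equals):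
--             return cat
--
--     for cat, d in spec.items():
--         prefixes = [str(x) for x in d.get("prefix", [])]
--         if any(rv_up.startswith(str(p).upper()) for p in prefixes):
--             return cat
--
--     for cat, d in spec.items():
--         contains = [str(x) for x in d.get("contains", [])]
--         if any(str(c).upper() in rv_up for c in contains):
--             return cat
--
--     return None
-- ===== SOURCE B (Python) =====
-- from typing import Optional
--
--
-- def _tier(rv_up: str, d: dict) -> int:
--     """Matching tier of one category: 0 equals, 1 prefix, 2 contains, 3 no match."""
--     if any(rv_up == str(e).upper() for e in d.get("equals", [])):
--         return 0
--     if any(rv_up.startswith(str(p).upper()) for p in d.get("prefix", [])):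
--         return 1
--     if any(str(c).upper() in rv_up for c in d.get("contains", [])):
--         return 2
--     return 3
--
--
-- def _find_category_for_value(spec: dict, raw_value: str) -> Optional[str]:
--     rv_up = raw_value.strip().upper()
--     best_tier = 3
--     best_cat = None
--     for cat, d in spec.items():
--         t = _tier(rv_up, d)
--         if t < best_tier:
--             best_tier, best_cat = t, cat
--     return best_cat
-- ===== Notes on version B (the rewrite author's own statement) =====
-- stated objective: alternative
-- what changed: Replaces A's three sequential full scans of the spec (equals pass, then prefix pass, then contains pass) by a single pass that computes each category's matching tier (0/1/2/3) and keeps the earliest category with the strictly smallest tier.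
import Mathlib
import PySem

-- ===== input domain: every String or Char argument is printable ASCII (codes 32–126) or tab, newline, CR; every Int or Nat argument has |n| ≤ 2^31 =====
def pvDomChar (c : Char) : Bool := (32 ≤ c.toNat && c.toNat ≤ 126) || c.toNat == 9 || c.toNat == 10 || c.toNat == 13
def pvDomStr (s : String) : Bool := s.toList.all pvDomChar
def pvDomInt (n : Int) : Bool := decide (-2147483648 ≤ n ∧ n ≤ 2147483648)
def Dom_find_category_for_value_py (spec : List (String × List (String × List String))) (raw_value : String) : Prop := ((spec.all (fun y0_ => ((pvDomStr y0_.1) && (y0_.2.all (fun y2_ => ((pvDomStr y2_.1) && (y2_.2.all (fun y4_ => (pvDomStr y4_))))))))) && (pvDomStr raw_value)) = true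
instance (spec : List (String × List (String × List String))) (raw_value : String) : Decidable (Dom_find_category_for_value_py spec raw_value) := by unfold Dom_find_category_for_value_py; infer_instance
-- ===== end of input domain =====

-- B replaces A's three sequential scans of the spec by a single pass keeping the
-- earliest category of strictly smallest matching tier (alternative decomposition).

-- ===== PORT A =====
-- shared case-insensitive predicates (identical in A and B, as in the Python sources)
def pvEqAny (rv_up : String) (d : List (String × List String)) : Bool :=
  ((PySem.Dict.mk d).getD "equals" []).any (fun e => rv_up == PySem.Str.upper e)

def pvPreAny (rv_up : String) (d : List (String × List String)) : Bool :=
  ((PySem.Dict.mk d).getD "prefix" []).any (fun p => PySem.Str.startswith rv_up (PySem.Str.upper p))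

def pvConAny (rv_up : String) (d : List (String × List String)) : Bool :=
  ((PySem.Dict.mk d).getD "contains" []).any (fun c => PySem.Str.isIn (PySem.Str.upper c) rv_up)

def find_category_for_value_py (spec : List (String × List (String × List String))) (raw_value : String) : Option String :=
  let rv := PySem.Str.strip raw_value
  let rv_up := PySem.Str.upper rv
  match spec.find? (fun cd => pvEqAny rv_up cd.2) with
  | some cd => some cd.1
  | none =>
    match spec.find? (fun cd => pvPreAny rv_up cd.2) with
    | some cd => some cd.1
    | none =>
      match spec.find? (fun cd => pvConAny rv_up cd.2) with
      | some cd => some cd.1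
      | none => none

-- ===== PORT B =====
def pvTier (rv_up : String) (d : List (String × List String)) : Nat :=
  if pvEqAny rv_up d then 0
  else if pvPreAny rv_up d then 1
  else if pvConAny rv_up d then 2
  else 3

def pvBestLoop (rv_up : String) : List (String × List (String × List String)) → Nat → Option String → Option String
  | [], _, best => best
  | (cat, d) :: rest, best_tier, best =>
      let t := pvTier rv_up d
      if t < best_tier then pvBestLoop rv_up rest t (some cat)
      else pvBestLoop rv_up rest best_tier best

def find_category_for_value_py_alt (spec : List (String × List (String × List String))) (raw_value : String) : Option String :=
  let rv_up := PySem.Str.upper (PySem.Str.strip raw_value)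
  pvBestLoop rv_up spec 3 none

-- ===== PRECONDITION & SPEC =====
def Spec_find_category_for_value_py (spec : List (String × List (String × List String))) (raw_value : String) (out : Option String) : Prop := out = find_category_for_value_py_alt spec raw_value
instance (spec : List (String × List (String × List String))) (raw_value : String) (out : Option String) : Decidable (Spec_find_category_for_value_py spec raw_value out) := by unfold Spec_find_category_for_value_py; infer_instance

-- ===== CLAIM (what is proved, stated in full; the proofs are below) =====
def Claim_equal_find_category_for_value_py : Prop := ∀ (spec : List (String × List (String × List String))) (raw_value : String), Dom_find_category_for_value_py spec raw_value → Spec_find_category_for_value_py spec raw_value (find_category_for_value_py spec raw_value)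

-- ===== LEMMAS AND PROOFS =====

-- minimum matching tier of a spec, with base value b (proof-side only)
def pvMinT (rv_up : String) (spec : List (String × List (String × List String))) (b : Nat) : Nat :=
  spec.foldr (fun cd m => min (pvTier rv_up cd.2) m) b

theorem pvMinT_nil (rv_up : String) (b : Nat) : pvMinT rv_up [] b = b := rfl

theorem pvMinT_cons (rv_up : String) (cd : String × List (String × List String))
    (rest : List (String × List (String × List String))) (b : Nat) :
    pvMinT rv_up (cd :: rest) b = min (pvTier rv_up cd.2) (pvMinT rv_up rest b) := rfl

theorem pvMinT_min (rv_up : String) (spec : List (String × List (String × List String))) (a b : Nat) :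
    pvMinT rv_up spec (min a b) = min (pvMinT rv_up spec a) b := by
  induction spec with
  | nil => rfl
  | cons cd rest ih => simp [pvMinT_cons, ih]

theorem pvMinT_le_base (rv_up : String) (spec : List (String × List (String × List String))) (b : Nat) :
    pvMinT rv_up spec b ≤ b := by
  induction spec with
  | nil => exact Nat.le_refl b
  | cons cd rest ih => rw [pvMinT_cons]; exact le_trans (Nat.min_le_right _ _) ih

theorem pvMinT_le_mem (rv_up : String) (spec : List (String × List (String × List String))) (b : Nat)
    (cd : String × List (String × List String)) (h : cd ∈ spec) :
    pvMinT rv_up spec b ≤ pvTier rv_up cd.2 := by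
  induction spec with
  | nil => cases h
  | cons hd rest ih =>
    rw [pvMinT_cons]
    rcases List.mem_cons.mp h with h | h
    · subst h; exact Nat.min_le_left _ _
    · exact le_trans (Nat.min_le_right _ _) (ih h)

theorem pvMinT_exists (rv_up : String) (spec : List (String × List (String × List String))) (b : Nat)
    (h : pvMinT rv_up spec b < b) :
    ∃ cd ∈ spec, pvTier rv_up cd.2 = pvMinT rv_up spec b := by
  induction spec with
  | nil => rw [pvMinT_nil] at h; omega
  | cons hd rest ih =>
    rw [pvMinT_cons] at h ⊢
    by_cases hm : pvMinT rv_up rest b ≤ pvTier rv_up hd.2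
    · have hmin : min (pvTier rv_up hd.2) (pvMinT rv_up rest b) = pvMinT rv_up rest b := by omega
      rw [hmin]
      rw [hmin] at h
      obtain ⟨cd, hmem, heq⟩ := ih h
      exact ⟨cd, List.mem_cons_of_mem _ hmem, heq⟩
    · exact ⟨hd, List.mem_cons_self, by omega⟩

theorem pvFind?_congr {α : Type} (p q : α → Bool) (l : List α)
    (h : ∀ a ∈ l, p a = q a) : l.find? p = l.find? q := by
  induction l with
  | nil => rfl
  | cons x xs ih =>
    have hx := h x (List.mem_cons_self)
    by_cases hp : p x = true
    · rw [List.find?_cons_of_pos hp, List.find?_cons_of_pos (hx ▸ hp)]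
    · have hq : ¬ q x = true := fun hq2 => hp (hx ▸ hq2)
      rw [List.find?_cons_of_neg hp, List.find?_cons_of_neg hq]
      exact ih (fun a ha => h a (List.mem_cons_of_mem _ ha))

theorem pvBestLoop_eq (rv_up : String) (spec : List (String × List (String × List String))) :
    ∀ (bt : Nat) (best : Option String),
    pvBestLoop rv_up spec bt best =
      if pvMinT rv_up spec bt < bt
      then (spec.find? (fun cd => pvTier rv_up cd.2 == pvMinT rv_up spec bt)).map (·.1)
      else best := by
  induction spec with
  | nil => intro bt best; rw [pvBestLoop, pvMinT_nil, if_neg (lt_irrefl bt)]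
  | cons hd rest ih =>
    intro bt best
    obtain ⟨cat, d⟩ := hd
    rw [pvBestLoop]
    by_cases hlt : pvTier rv_up d < bt
    · rw [if_pos hlt, ih (pvTier rv_up d) (some cat)]
      have hmt : pvMinT rv_up rest (pvTier rv_up d) = min (pvMinT rv_up rest bt) (pvTier rv_up d) := by
        have h2 := pvMinT_min rv_up rest bt (pvTier rv_up d)
        rwa [Nat.min_eq_right (Nat.le_of_lt hlt)] at h2
      have hcons : pvMinT rv_up ((cat, d) :: rest) bt = pvMinT rv_up rest (pvTier rv_up d) := by
        have h4 : pvMinT rv_up ((cat, d) :: rest) bt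
            = min (pvTier rv_up d) (pvMinT rv_up rest bt) := rfl
        rw [h4]
        omega
      rw [hcons]
      by_cases hm : pvMinT rv_up rest (pvTier rv_up d) < pvTier rv_up d
      · rw [if_pos hm, if_pos (lt_trans hm hlt)]
        have hfc : List.find? (fun cd => pvTier rv_up cd.2 == pvMinT rv_up rest (pvTier rv_up d))
            ((cat, d) :: rest) = List.find? (fun cd => pvTier rv_up cd.2 ==
              pvMinT rv_up rest (pvTier rv_up d)) rest := by
          apply List.find?_cons_of_neg
          show ¬(pvTier rv_up d == pvMinT rv_up rest (pvTier rv_up d)) = true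
          simp only [beq_iff_eq]
          omega
        rw [hfc]
      · have heq : pvMinT rv_up rest (pvTier rv_up d) = pvTier rv_up d := by
          have h3 := pvMinT_le_base rv_up rest (pvTier rv_up d)
          omega
        rw [if_neg hm, if_pos (show pvMinT rv_up rest (pvTier rv_up d) < bt by omega)]
        have hfc : List.find? (fun cd => pvTier rv_up cd.2 == pvMinT rv_up rest (pvTier rv_up d))
            ((cat, d) :: rest) = some (cat, d) := by
          apply List.find?_cons_of_pos
          show (pvTier rv_up d == pvMinT rv_up rest (pvTier rv_up d)) = true
          simp only [beq_iff_eq]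
          omega
        rw [hfc]
        rfl
    · rw [if_neg hlt, ih bt best]
      have hcons : pvMinT rv_up ((cat, d) :: rest) bt = pvMinT rv_up rest bt := by
        have h3 := pvMinT_le_base rv_up rest bt
        have h4 : pvMinT rv_up ((cat, d) :: rest) bt
            = min (pvTier rv_up d) (pvMinT rv_up rest bt) := rfl
        rw [h4]
        omega
      rw [hcons]
      by_cases hm : pvMinT rv_up rest bt < bt
      · rw [if_pos hm, if_pos hm]
        have hfc : List.find? (fun cd => pvTier rv_up cd.2 == pvMinT rv_up rest bt)
            ((cat, d) :: rest) = List.find? (fun cd => pvTier rv_up cd.2 ==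
              pvMinT rv_up rest bt) rest := by
          apply List.find?_cons_of_neg
          show ¬(pvTier rv_up d == pvMinT rv_up rest bt) = true
          simp only [beq_iff_eq]
          omega
        rw [hfc]
      · rw [if_neg hm, if_neg hm]

theorem pvTier_eq_zero_iff (rv_up : String) (d : List (String × List String)) :
    (pvTier rv_up d == 0) = pvEqAny rv_up d := by
  unfold pvTier
  by_cases he : pvEqAny rv_up d = true
  · rw [if_pos he, he]; rfl
  · simp only [Bool.not_eq_true] at he
    rw [he]
    simp only [Bool.false_eq_true, if_false]
    split_ifs <;> rfl

theorem pvTier_le_one_of_pre (rv_up : String) (d : List (String × List String))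
    (h : pvPreAny rv_up d = true) : pvTier rv_up d ≤ 1 := by
  unfold pvTier
  by_cases he : pvEqAny rv_up d = true
  · rw [if_pos he]; omega
  · rw [if_neg he, if_pos h]

theorem pvTier_le_two_of_con (rv_up : String) (d : List (String × List String))
    (h : pvConAny rv_up d = true) : pvTier rv_up d ≤ 2 := by
  unfold pvTier
  by_cases he : pvEqAny rv_up d = true
  · rw [if_pos he]; omega
  · by_cases hp : pvPreAny rv_up d = true
    · rw [if_neg he, if_pos hp]; omega
    · rw [if_neg he, if_neg hp, if_pos h]

-- ===== VERDICT (by name: the statement is the Claim_ definition above) =====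
theorem find_category_for_value_py_spec : Claim_equal_find_category_for_value_py := by
  intro spec raw_value _
  unfold Spec_find_category_for_value_py
  simp only [find_category_for_value_py, find_category_for_value_py_alt]
  rw [pvBestLoop_eq]
  set rv_up := PySem.Str.upper (PySem.Str.strip raw_value) with hrv
  set M := pvMinT rv_up spec 3 with hM
  have hb : M ≤ 3 := by rw [hM]; exact pvMinT_le_base rv_up spec 3
  have hmem : ∀ cd ∈ spec, M ≤ pvTier rv_up cd.2 := by
    intro cd h; rw [hM]; exact pvMinT_le_mem rv_up spec 3 cd h
  have hex : M < 3 → ∃ cd ∈ spec, pvTier rv_up cd.2 = M := by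
    intro h; rw [hM]; exact pvMinT_exists rv_up spec 3 (by omega)
  have hcase : M = 0 ∨ M = 1 ∨ M = 2 ∨ M = 3 := by omega
  rcases hcase with h | h | h | h
  · -- min tier 0: A's first scan hits exactly the tier-0 categories
    rw [h] at hmem hex ⊢
    rw [if_pos (by omega)]
    have hfeq : spec.find? (fun cd => pvEqAny rv_up cd.2)
        = spec.find? (fun cd => pvTier rv_up cd.2 == 0) :=
      pvFind?_congr _ _ spec (fun cd _ => (pvTier_eq_zero_iff rv_up cd.2).symm)
    rw [hfeq]
    obtain ⟨cd₀, hmem₀, htier₀⟩ := hex (by omega)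
    have hs : (spec.find? (fun cd => pvTier rv_up cd.2 == 0)).isSome := by
      rw [List.find?_isSome]
      exact ⟨cd₀, hmem₀, by simp [htier₀]⟩
    obtain ⟨cd, hfind⟩ := Option.isSome_iff_exists.mp hs
    rw [hfind]
    rfl
  · -- min tier 1: no equals match anywhere; the prefix scan is exactly the tier-1 scan
    rw [h] at hmem hex ⊢
    rw [if_pos (by omega)]
    have hnoeq : ∀ cd ∈ spec, pvEqAny rv_up cd.2 = false := by
      intro cd hm
      rw [← pvTier_eq_zero_iff]
      have := hmem cd hm
      simp only [beq_eq_false_iff_ne, ne_eq]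
      omega
    rw [List.find?_eq_none.mpr (fun cd hm => by simp [hnoeq cd hm])]
    have hfpre : spec.find? (fun cd => pvPreAny rv_up cd.2)
        = spec.find? (fun cd => pvTier rv_up cd.2 == 1) := by
      apply pvFind?_congr
      intro cd hm
      have h0 := hnoeq cd hm
      by_cases hp : pvPreAny rv_up cd.2 = true <;>
        by_cases hc : pvConAny rv_up cd.2 = true <;>
          simp [pvTier, h0, hp, hc]
    rw [hfpre]
    obtain ⟨cd₀, hmem₀, htier₀⟩ := hex (by omega)
    have hs : (spec.find? (fun cd => pvTier rv_up cd.2 == 1)).isSome := by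
      rw [List.find?_isSome]
      exact ⟨cd₀, hmem₀, by simp [htier₀]⟩
    obtain ⟨cd, hfind⟩ := Option.isSome_iff_exists.mp hs
    rw [hfind]
    rfl
  · -- min tier 2: no equals/prefix match anywhere; the contains scan is the tier-2 scan
    rw [h] at hmem hex ⊢
    rw [if_pos (by omega)]
    have hnolow : ∀ cd ∈ spec, pvEqAny rv_up cd.2 = false ∧ pvPreAny rv_up cd.2 = false := by
      intro cd hm
      have hge := hmem cd hm
      constructor
      · rw [← pvTier_eq_zero_iff]
        simp only [beq_eq_false_iff_ne, ne_eq]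
        omega
      · by_contra hcon
        simp only [Bool.not_eq_false] at hcon
        have := pvTier_le_one_of_pre rv_up cd.2 hcon
        omega
    rw [List.find?_eq_none.mpr (fun cd hm => by simp [(hnolow cd hm).1])]
    rw [List.find?_eq_none.mpr (fun cd hm => by simp [(hnolow cd hm).2])]
    have hfcon : spec.find? (fun cd => pvConAny rv_up cd.2)
        = spec.find? (fun cd => pvTier rv_up cd.2 == 2) := by
      apply pvFind?_congr
      intro cd hm
      obtain ⟨h0, h1⟩ := hnolow cd hm
      by_cases hc : pvConAny rv_up cd.2 = true <;> simp [pvTier, h0, h1, hc]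
    rw [hfcon]
    obtain ⟨cd₀, hmem₀, htier₀⟩ := hex (by omega)
    have hs : (spec.find? (fun cd => pvTier rv_up cd.2 == 2)).isSome := by
      rw [List.find?_isSome]
      exact ⟨cd₀, hmem₀, by simp [htier₀]⟩
    obtain ⟨cd, hfind⟩ := Option.isSome_iff_exists.mp hs
    rw [hfind]
    rfl
  · -- min tier 3: no category matches anything; all three scans come up empty
    rw [h] at hmem ⊢
    rw [if_neg (by omega)]
    have hne : ∀ cd ∈ spec, pvEqAny rv_up cd.2 = false ∧ pvPreAny rv_up cd.2 = false ∧
        pvConAny rv_up cd.2 = false := by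
      intro cd hm
      have hge := hmem cd hm
      refine ⟨?_, ?_, ?_⟩
      · rw [← pvTier_eq_zero_iff]
        simp only [beq_eq_false_iff_ne, ne_eq]
        omega
      · by_contra hcon
        simp only [Bool.not_eq_false] at hcon
        have := pvTier_le_one_of_pre rv_up cd.2 hcon
        omega
      · by_contra hcon
        simp only [Bool.not_eq_false] at hcon
        have := pvTier_le_two_of_con rv_up cd.2 hcon
        omega
    rw [List.find?_eq_none.mpr (fun cd hm => by simp [(hne cd hm).1])]
    rw [List.find?_eq_none.mpr (fun cd hm => by simp [(hne cd hm).2.1])]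
    rw [List.find?_eq_none.mpr (fun cd hm => by simp [(hne cd hm).2.2])]
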